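-- pv_equiv track=rewrite | github.com/escossio/observabilidade | dependency-graph/tools/render_grafana_causal_tree.py | aggregate_state
-- ===== SOURCE A (Python) =====
-- STATE_UP = "up"
--
-- STATE_DOWN = "down"
--
-- STATE_WARN = "warn"
--
-- STATE_UNKNOWN = "unknown"
--
-- def aggregate_state(states: list[str]) -> str:
--     if not states:
--         return STATE_UNKNOWN
--     if all(state == STATE_UNKNOWN for state in states):
--         return STATE_UNKNOWN
--     if any(state == STATE_DOWN for state in states):
--         return STATE_DOWN
--     if any(state == STATE_WARN for state in states):
--         return STATE_WARN
--     if any(state == STATE_UNKNOWN for state in states):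
--         return STATE_WARN
--     return STATE_UP
-- ===== SOURCE B (Python) =====
-- STATE_UP = "up"
-- STATE_DOWN = "down"
-- STATE_WARN = "warn"
-- STATE_UNKNOWN = "unknown"
--
-- def aggregate_state(states: list[str]) -> str:
--     # one pass: summarise the list into four flags, then decide in O(1)
--     has_down = has_warn = has_unknown = has_other = False
--     for s in states:
--         has_down = has_down or s == STATE_DOWN
--         has_warn = has_warn or s == STATE_WARN
--         has_unknown = has_unknown or s == STATE_UNKNOWN
--         has_other = has_other or s != STATE_UNKNOWN
--     if not has_other:
--         return STATE_UNKNOWN   # empty list or every state unknown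
--     if has_down:
--         return STATE_DOWN
--     if has_warn or has_unknown:
--         return STATE_WARN
--     return STATE_UP
-- ===== Notes on version B (the rewrite author's own statement) =====
-- stated objective: alternative
-- what changed: replaces A's five cascading full-list scans (all/any x4) with a single fold that accumulates four boolean flags followed by a constant-time decision
import Mathlib
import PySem

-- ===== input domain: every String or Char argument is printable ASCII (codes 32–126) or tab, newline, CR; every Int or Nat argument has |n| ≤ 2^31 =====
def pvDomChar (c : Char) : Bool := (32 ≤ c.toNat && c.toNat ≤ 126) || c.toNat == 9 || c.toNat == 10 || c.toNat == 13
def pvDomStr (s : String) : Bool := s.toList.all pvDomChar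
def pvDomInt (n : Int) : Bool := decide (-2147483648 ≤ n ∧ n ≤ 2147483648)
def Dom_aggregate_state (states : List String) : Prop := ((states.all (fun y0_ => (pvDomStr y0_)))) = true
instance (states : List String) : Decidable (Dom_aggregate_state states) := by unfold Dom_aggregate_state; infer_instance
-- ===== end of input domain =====

-- B replaces A's five cascading list scans with one fold into four flags plus a constant-time decision (alternative decomposition, same cost).


-- ===== PORT A =====
def aggregate_state (states : List String) : String :=
  if states.isEmpty then "unknown"
  else if states.all (fun s => s == "unknown") then "unknown"
  else if states.any (fun s => s == "down") then "down"
  else if states.any (fun s => s == "warn") then "warn"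
  else if states.any (fun s => s == "unknown") then "warn"
  else "up"

-- ===== PORT B =====
def aggregate_state_alt (states : List String) : String :=
  let f := states.foldl
    (fun (acc : Bool × Bool × Bool × Bool) s =>
      (acc.1 || s == "down", acc.2.1 || s == "warn",
       acc.2.2.1 || s == "unknown", acc.2.2.2 || s != "unknown"))
    (false, false, false, false)
  if !f.2.2.2 then "unknown"
  else if f.1 then "down"
  else if f.2.1 || f.2.2.1 then "warn"
  else "up"

-- ===== PRECONDITION & SPEC =====
def Spec_aggregate_state (states : List String) (out : String) : Prop := out = aggregate_state_alt states
instance (states : List String) (out : String) : Decidable (Spec_aggregate_state states out) := by unfold Spec_aggregate_state; infer_instance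

-- ===== CLAIM (what is proved, stated in full; the proofs are below) =====
def Claim_equal_aggregate_state : Prop := ∀ (states : List String), Dom_aggregate_state states → Spec_aggregate_state states (aggregate_state states)

-- ===== LEMMAS AND PROOFS =====
-- The fold computes exactly the four any-flags, joined with the starting accumulator.
theorem aggFlags_eq (states : List String) (a : Bool × Bool × Bool × Bool) :
    states.foldl
      (fun (acc : Bool × Bool × Bool × Bool) s =>
        (acc.1 || s == "down", acc.2.1 || s == "warn",
         acc.2.2.1 || s == "unknown", acc.2.2.2 || s != "unknown"))
      a
    = (a.1 || states.any (fun s => s == "down"),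
       a.2.1 || states.any (fun s => s == "warn"),
       a.2.2.1 || states.any (fun s => s == "unknown"),
       a.2.2.2 || states.any (fun s => s != "unknown")) := by
  induction states generalizing a with
  | nil => simp
  | cons h t ih =>
      simp only [List.foldl_cons, List.any_cons, ih]
      simp [Bool.or_assoc]

-- ===== VERDICT (by name: the statement is the Claim_ definition above) =====
theorem aggregate_state_spec : Claim_equal_aggregate_state := by
  intro states _
  show aggregate_state states = aggregate_state_alt states
  unfold aggregate_state aggregate_state_alt
  rw [aggFlags_eq]
  simp only [Bool.false_or]
  have hall : (states.all (fun s => s == "unknown")) = !(states.any (fun s => s != "unknown")) := by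
    simp [List.all_eq_not_any_not, bne]
  cases states with
  | nil => simp
  | cons h t =>
      rw [hall]
      simp only [List.isEmpty_cons, Bool.false_eq_true, if_false]
      cases h1 : (h :: t).any (fun s => s != "unknown") <;>
        cases h2 : (h :: t).any (fun s => s == "down") <;>
          cases h3 : (h :: t).any (fun s => s == "warn") <;>
            cases h4 : (h :: t).any (fun s => s == "unknown") <;> simp
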